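-- pv_equiv track=rewrite | github.com/Compass-Brand/ai-documentation-testing | agent-evals/src/agent_evals/variants/transform_llm_compressed.py | _extract_paragraph_leads
-- ===== SOURCE A (Python) =====
-- def _extract_paragraph_leads(content: str) -> str:
--     """Extract the first line of each paragraph.
--
--     Paragraphs are separated by one or more blank lines.  The leading
--     (non-empty) line of each paragraph is taken as a representative
--     summary sentence.
--     """
--     paragraphs: list[str] = []
--     current_paragraph: list[str] = []
--
--     for line in content.splitlines():
--         stripped = line.strip()
--         if not stripped:
--             if current_paragraph:
--                 paragraphs.append(current_paragraph[0])
--                 current_paragraph = []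
--         else:
--             current_paragraph.append(stripped)
--
--     # Capture the last paragraph if file doesn't end with a blank line
--     if current_paragraph:
--         paragraphs.append(current_paragraph[0])
--
--     return "\n".join(paragraphs)
-- ===== SOURCE B (Python) =====
-- def _extract_paragraph_leads(content: str) -> str:
--     """Lead line of each blank-separated paragraph, via a shifted-zip comprehension."""
--     stripped = [line.strip() for line in content.splitlines()]
--     return "\n".join(s for prev, s in zip([""] + stripped, stripped) if s and not prev)
-- ===== Notes on version B (the rewrite author's own statement) =====
-- stated objective: idiomatic
-- what changed: Replaces the accumulate/flush paragraph state machine with a stateless characterisation: strip all lines once, then select exactly the nonempty lines whose predecessor (or start of text) is blank, via zipping the stripped list with itself shifted by one.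
import Mathlib
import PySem

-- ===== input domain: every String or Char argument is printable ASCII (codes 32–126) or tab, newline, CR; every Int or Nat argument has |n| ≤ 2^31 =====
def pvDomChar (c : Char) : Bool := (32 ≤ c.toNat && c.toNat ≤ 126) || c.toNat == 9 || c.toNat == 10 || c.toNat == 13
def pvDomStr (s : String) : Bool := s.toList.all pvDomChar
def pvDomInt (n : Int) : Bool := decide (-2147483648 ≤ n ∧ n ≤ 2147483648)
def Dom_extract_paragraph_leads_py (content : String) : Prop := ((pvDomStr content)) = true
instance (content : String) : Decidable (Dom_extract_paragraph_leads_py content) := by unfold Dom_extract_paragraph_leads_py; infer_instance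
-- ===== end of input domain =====

-- B replaces A's accumulate/flush state machine with a stateless shifted-zip selection of lead lines (idiomatic; same cost).

-- ===== PORT A =====
-- Python A: fold over splitlines with state (paragraphs, current_paragraph); flush head on blank line.
def extract_paragraph_leads_py (content : String) : String :=
  let st := (PySem.Str.splitlines content).foldl
    (fun (st : List String × List String) line =>
      let stripped := PySem.Str.strip line
      if stripped = "" then
        if st.2 ≠ [] then (st.1 ++ [st.2.headD ""], []) else st
      else (st.1, st.2 ++ [stripped]))
    ([], [])
  let paragraphs := if st.2 ≠ [] then st.1 ++ [st.2.headD ""] else st.1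
  PySem.Str.join "\n" paragraphs

-- ===== PORT B =====
-- Python B: strip every line; keep exactly the nonempty lines whose predecessor ("" at start) is blank.
def extract_paragraph_leads_py_alt (content : String) : String :=
  let stripped := (PySem.Str.splitlines content).map PySem.Str.strip
  PySem.Str.join "\n"
    (((("" :: stripped).zip stripped).filter (fun p => !(p.2 = "") && (p.1 = ""))).map (·.2))

-- ===== PRECONDITION & SPEC =====
def Spec_extract_paragraph_leads_py (content : String) (out : String) : Prop := out = extract_paragraph_leads_py_alt content
instance (content : String) (out : String) : Decidable (Spec_extract_paragraph_leads_py content out) := by unfold Spec_extract_paragraph_leads_py; infer_instance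

-- ===== CLAIM (what is proved, stated in full; the proofs are below) =====
def Claim_equal_extract_paragraph_leads_py : Prop := ∀ (content : String), Dom_extract_paragraph_leads_py content → Spec_extract_paragraph_leads_py content (extract_paragraph_leads_py content)

-- ===== LEMMAS AND PROOFS =====

-- leads of a stripped-line list, given whether the previous line was blank (true at start)
def pvLeadsAux : List String → Bool → List String
  | [], _ => []
  | s :: rest, flag =>
    if s = "" then pvLeadsAux rest true
    else (if flag then [s] else []) ++ pvLeadsAux rest false

theorem pvZip_eq_leadsAux (l : List String) (p : String) :
    (((p :: l).zip l).filter (fun q => !(q.2 = "") && (q.1 = ""))).map (·.2)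
      = pvLeadsAux l (p = "") := by
  induction l generalizing p with
  | nil => simp [pvLeadsAux]
  | cons s rest ih =>
    simp only [List.zip_cons_cons, List.filter_cons, pvLeadsAux]
    by_cases hs : s = "" <;> by_cases hp : p = "" <;>
      simp [hs, hp, ih s, ih ("" : String)]

theorem pvFold_eq_leadsAux (lines : List String) (ps cur : List String) :
    (let st := lines.foldl
      (fun (st : List String × List String) line =>
        let stripped := PySem.Str.strip line
        if stripped = "" then
          if st.2 ≠ [] then (st.1 ++ [st.2.headD ""], []) else st
        else (st.1, st.2 ++ [stripped]))
      (ps, cur)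
     if st.2 ≠ [] then st.1 ++ [st.2.headD ""] else st.1)
    = (if cur ≠ [] then ps ++ [cur.headD ""] else ps)
      ++ pvLeadsAux (lines.map PySem.Str.strip) (cur = []) := by
  induction lines generalizing ps cur with
  | nil => cases cur <;> simp [pvLeadsAux]
  | cons line rest ih =>
    simp only [List.foldl_cons, List.map_cons, pvLeadsAux]
    by_cases hs : PySem.Str.strip line = ""
    · cases cur with
      | nil => simpa [hs] using ih ps []
      | cons c cs => simpa [hs] using ih (ps ++ [c]) []
    · cases cur with
      | nil => simpa [hs] using ih ps [PySem.Str.strip line]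
      | cons c cs => simpa [hs] using ih ps (c :: cs ++ [PySem.Str.strip line])

-- ===== VERDICT (by name: the statement is the Claim_ definition above) =====
theorem extract_paragraph_leads_py_spec : Claim_equal_extract_paragraph_leads_py := by
  intro content _
  show _ = _
  simp only [extract_paragraph_leads_py, extract_paragraph_leads_py_alt]
  rw [pvZip_eq_leadsAux]
  have h := pvFold_eq_leadsAux (PySem.Str.splitlines content) [] []
  simp only [ne_eq, List.nil_append, not_true_eq_false, if_false, ite_not, decide_true] at h ⊢
  rw [h]
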